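-- pv_equiv track=rewrite | github.com/Nicolas-Andreas/anime-recommendation-system-website | classes.py | find_closest_user
-- ===== SOURCE A (Python) =====
-- def find_closest_user(user_anime, user_set_dict):
--    #user_anime: list of anime Ids active user interacted with
--     #user_set_dict: dict of userID to their set of animes watched
--
--     active_user_set = set(user_anime)
--
--     closest_user = 0
--     closest_distance = float('inf')
--     for user in user_set_dict.keys():
--         distance = len(active_user_set.symmetric_difference(user_set_dict[user]))
--         if distance < closest_distance:
--             closest_user = user
--             closest_distance = distance
--     return closest_user, closest_distance
-- ===== SOURCE B (Python) =====
-- def find_closest_user(user_anime, user_set_dict):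
--     # Inverted index anime -> users; intersection counts are accumulated from
--     # the active user's anime only, then |A ^ S| = |A| + |S| - 2*|A & S|.
--     active = set(user_anime)
--     sizes = {}
--     pairs = []
--     for user, animes in user_set_dict.items():
--         s = set(animes)
--         sizes[user] = len(s)
--         for a in s:
--             pairs.append((a, user))
--     inverted = {}
--     for a, user in pairs:
--         inverted.setdefault(a, []).append(user)
--     counts = {}
--     for a in active:
--         for user in inverted.get(a, []):
--             counts[user] = counts.get(user, 0) + 1
--     na = len(active)
--     best = None
--     for user in user_set_dict:
--         dist = na + sizes[user] - 2 * counts.get(user, 0)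
--         if best is None or dist < best[1]:
--             best = (user, dist)
--     return best
-- ===== Notes on version B (the rewrite author's own statement) =====
-- stated objective: faster
-- what changed: Instead of building each user's symmetric difference with the active set, B builds an inverted index anime->users once, accumulates intersection counts only from the active user's anime, and scores each user by |A|+|S_u|-2*|A∩S_u|.
-- outside the precondition, e.g. on find_closest_user([1], {}): A returns (0, inf), B returns None
import Mathlib
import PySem

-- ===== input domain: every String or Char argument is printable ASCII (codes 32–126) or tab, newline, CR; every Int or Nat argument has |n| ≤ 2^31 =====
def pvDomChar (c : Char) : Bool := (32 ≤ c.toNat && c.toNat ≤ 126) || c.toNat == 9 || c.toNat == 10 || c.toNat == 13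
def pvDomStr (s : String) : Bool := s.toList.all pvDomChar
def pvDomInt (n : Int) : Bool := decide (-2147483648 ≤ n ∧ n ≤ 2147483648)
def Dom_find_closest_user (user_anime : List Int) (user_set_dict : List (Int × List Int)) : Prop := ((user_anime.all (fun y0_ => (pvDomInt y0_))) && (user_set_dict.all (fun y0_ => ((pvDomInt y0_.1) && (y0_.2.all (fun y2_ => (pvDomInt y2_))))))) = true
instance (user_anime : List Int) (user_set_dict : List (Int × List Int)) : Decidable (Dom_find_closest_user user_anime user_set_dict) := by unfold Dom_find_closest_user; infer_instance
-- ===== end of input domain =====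

-- B replaces A's per-user symmetric-difference construction by an inverted index anime→users:
-- intersection counts are accumulated from the active anime only, then |AΔS| = |A|+|S|-2|A∩S|.
-- Equivalence is about the return value (neither version mutates its arguments).

-- ===== PORT A =====
-- loop body of A: state (closest_user, closest_distance); none models float('inf')
def pvStepA (f : Int → Int) (st : Int × Option Int) (u : Int) : Int × Option Int :=
  match st.2 with
  | none => (u, some (f u))
  | some cd => if f u < cd then (u, some (f u)) else st

def find_closest_user (user_anime : List Int) (user_set_dict : List (Int × List Int)) : Int × Int :=
  let active : PySem.Set Int := PySem.Set.ofList user_anime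
  let d := PySem.Dict.ofList user_set_dict
  let r := List.foldl
    (pvStepA (fun user =>
      PySem.Set.len (PySem.Set.symmDiff active (PySem.Set.ofList (d.getD user [])))))
    (0, none) d.keys
  -- user is always a key, so getD's default is never read; Pre_ rules out the
  -- empty dict, where A would return closest_distance = float('inf') (not an Int)
  (r.1, r.2.getD 0)

-- ===== PORT B =====
-- B-side helpers: the four accumulation loops of Source B, one def per loop
-- sizes[user] = len(set(animes)), via dict insert over the items
def pvSizes (user_set_dict : List (Int × List Int)) : PySem.Dict Int Int :=
  (PySem.Dict.ofList user_set_dict).items.foldl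
    (fun sz p => sz.insert p.1 (PySem.Set.len (PySem.Set.ofList p.2))) PySem.Dict.empty

-- pairs: the flat (anime, user) list
def pvPairs (user_set_dict : List (Int × List Int)) : List (Int × Int) :=
  (PySem.Dict.ofList user_set_dict).items.foldl
    (fun ps p => ps ++ (PySem.Set.ofList p.2).map (fun a => (a, p.1))) []

-- inverted.setdefault(a, []).append(user) over the pairs
def pvInverted (user_set_dict : List (Int × List Int)) : PySem.Dict Int (List Int) :=
  (pvPairs user_set_dict).foldl
    (fun inv q => inv.modify q.1 [] (fun l => l ++ [q.2])) PySem.Dict.empty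

-- counts[user] += 1 for every active anime a and every user in inverted[a]
def pvCounts (user_anime : List Int) (user_set_dict : List (Int × List Int)) : PySem.Dict Int Int :=
  (PySem.Set.ofList user_anime).foldl
    (fun c a => ((pvInverted user_set_dict).getD a []).foldl
      (fun c u => c.modify u 0 (· + 1)) c) PySem.Dict.empty

-- loop body of B's final pass: best = none models Python's best = None
def pvStepB (g : Int → Int) (b : Option (Int × Int)) (u : Int) : Option (Int × Int) :=
  match b with
  | none => some (u, g u)
  | some p => if g u < p.2 then some (u, g u) else b

def find_closest_user_alt (user_anime : List Int) (user_set_dict : List (Int × List Int)) : Int × Int :=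
  let active : PySem.Set Int := PySem.Set.ofList user_anime
  let d := PySem.Dict.ofList user_set_dict
  let sizes := pvSizes user_set_dict
  let counts := pvCounts user_anime user_set_dict
  let na : Int := PySem.Set.len active
  let best := List.foldl
    (pvStepB (fun user => na + sizes.getD user 0 - 2 * counts.getD user 0))
    none d.keys
  -- sizes[user] is always present; best = None only for the empty dict, outside Pre_
  best.getD (0, 0)

-- ===== PRECONDITION & SPEC =====
-- Pre_ excludes only the empty dict: there A returns closest_distance = float('inf'),
-- which is not an Int (B's Python returns None there).
def Pre_find_closest_user (user_anime : List Int) (user_set_dict : List (Int × List Int)) : Prop :=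
  user_set_dict ≠ []
instance (user_anime : List Int) (user_set_dict : List (Int × List Int)) : Decidable (Pre_find_closest_user user_anime user_set_dict) := by unfold Pre_find_closest_user; infer_instance

def pvWitness_find_closest_user : List Int × (List (Int × List Int)) := ([1, 2, 5], [(7, [1, 3]), (8, [2, 5])])

def Spec_find_closest_user (user_anime : List Int) (user_set_dict : List (Int × List Int)) (out : Int × Int) : Prop := out = find_closest_user_alt user_anime user_set_dict
instance (user_anime : List Int) (user_set_dict : List (Int × List Int)) (out : Int × Int) : Decidable (Spec_find_closest_user user_anime user_set_dict out) := by unfold Spec_find_closest_user; infer_instance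

-- ===== CLAIM (what is proved, stated in full; the proofs are below) =====
def Claim_equal_find_closest_user : Prop := ∀ (user_anime : List Int) (user_set_dict : List (Int × List Int)), Dom_find_closest_user user_anime user_set_dict → Pre_find_closest_user user_anime user_set_dict → Spec_find_closest_user user_anime user_set_dict (find_closest_user user_anime user_set_dict)

-- ===== LEMMAS AND PROOFS =====

-- `==` on pairs of Ints is componentwise (definitional)
theorem pvProdBeq (a b c d : Int) : ((a, b) == (c, d)) = (a == c && b == d) := rfl

-- A's loop state maps to B's: (u, none) ↦ none, (u, some c) ↦ some (u, c)
def pvConv : Int × Option Int → Option (Int × Int)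
  | (_, none) => none
  | (u, some c) => some (u, c)

theorem pvFold_conv (f g : Int → Int) (l : List Int) (h : ∀ u ∈ l, f u = g u)
    (st : Int × Option Int) :
    List.foldl (pvStepB g) (pvConv st) l = pvConv (List.foldl (pvStepA f) st l) := by
  induction l generalizing st with
  | nil => rfl
  | cons x xs ih =>
    have hx : f x = g x := h x (by simp)
    have hrest : ∀ u ∈ xs, f u = g u := fun u hu => h u (by simp [hu])
    have hstep : pvStepB g (pvConv st) x = pvConv (pvStepA f st x) := by
      obtain ⟨u, c⟩ := st
      cases c with
      | none => simp [pvStepA, pvStepB, pvConv, hx]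
      | some cd =>
        simp only [pvStepA, pvStepB, pvConv, hx]
        by_cases hlt : g x < cd <;> simp [hlt]
    simpa [List.foldl_cons, hstep] using ih hrest _

theorem pvFold_isSome (f : Int → Int) (l : List Int) (st : Int × Option Int)
    (h : l ≠ [] ∨ st.2.isSome) : (List.foldl (pvStepA f) st l).2.isSome := by
  induction l generalizing st with
  | nil => simpa using h.resolve_left (by simp)
  | cons x xs ih =>
    apply ih
    obtain ⟨u, c⟩ := st
    cases c with
    | none => right; simp [pvStepA]
    | some cd => right; simp only [pvStepA]; by_cases hlt : f x < cd <;> simp [hlt]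

-- sum over an assoc list with unique keys picks out the single entry at key u
theorem pvSum_single_key {ν : Type} (items : List (Int × ν)) (u : Int) (lst : ν) (g : ν → Nat)
    (hnd : (items.map (·.1)).Nodup) (hmem : (u, lst) ∈ items) :
    (items.map (fun p => if p.1 = u then g p.2 else 0)).sum = g lst := by
  induction items with
  | nil => cases hmem
  | cons p ps ih =>
    simp only [List.map_cons, List.nodup_cons] at hnd
    rcases List.mem_cons.mp hmem with h | h
    · cases h.symm
      have hz : (List.map (fun p => if p.1 = u then g p.2 else 0) ps).sum = 0 := by
        apply List.sum_eq_zero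
        intro x hx
        obtain ⟨q, hq, rfl⟩ := List.mem_map.mp hx
        have hm : q.1 ∈ ps.map (·.1) := List.mem_map_of_mem hq
        have : q.1 ≠ u := fun he => hnd.1 (he ▸ hm)
        simp [this]
      simp [hz]
    · have hm : (u, lst).1 ∈ ps.map (·.1) := List.mem_map_of_mem h
      have hne : p.1 ≠ u := fun he => hnd.1 (he ▸ hm)
      simp [hne, ih hnd.2 h]

-- 0/1 membership sums are countP
theorem pvSum_ite_countP (S xs : List Int) :
    (xs.map (fun a => if a ∈ S then (1 : Nat) else 0)).sum = xs.countP (fun a => decide (a ∈ S)) := by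
  induction xs with
  | nil => rfl
  | cons x xs ih => by_cases h : x ∈ S <;> simp [h, ih, Nat.add_comm]

-- intersection counts are symmetric on duplicate-free lists
theorem pvCountP_mem_comm (A S : List Int) (hA : A.Nodup) (hS : S.Nodup) :
    A.countP (fun a => decide (a ∈ S)) = S.countP (fun s => decide (s ∈ A)) := by
  rw [List.countP_eq_length_filter, List.countP_eq_length_filter]
  rw [← List.toFinset_card_of_nodup (hA.filter _), ← List.toFinset_card_of_nodup (hS.filter _)]
  congr 1
  ext x
  simp [List.mem_toFinset, and_comm]

-- length of the symmetric difference via the inclusion–exclusion formula (over Int)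
theorem pvSymmDiff_len (A S : List Int) (hA : A.Nodup) (hS : S.Nodup) :
    PySem.Set.len (PySem.Set.symmDiff A S) =
      (A.length : Int) + S.length - 2 * (A.countP (fun a => decide (a ∈ S)) : Int) := by
  have hlen : PySem.Set.len (PySem.Set.symmDiff A S) =
      ((A.countP (fun a => !decide (a ∈ S)) : Int) + (S.countP (fun s => !decide (s ∈ A)) : Int)) := by
    simp [PySem.Set.len, PySem.Set.symmDiff, PySem.Set.diff, PySem.Set.contains,
      List.countP_eq_length_filter]
  have h1 : A.length = A.countP (fun a => decide (a ∈ S)) + A.countP (fun a => !decide (a ∈ S)) := by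
    simpa using List.length_eq_countP_add_countP (fun a => decide (a ∈ S)) (l := A)
  have h2 : S.length = S.countP (fun s => decide (s ∈ A)) + S.countP (fun s => !decide (s ∈ A)) := by
    simpa using List.length_eq_countP_add_countP (fun s => decide (s ∈ A)) (l := S)
  have h3 := pvCountP_mem_comm A S hA hS
  rw [hlen]
  omega

-- keys of a dict built from an assoc list are the deduplicated first components
theorem pvKeys_ofList (usd : List (Int × List Int)) :
    (PySem.Dict.ofList usd).keys = PySem.Set.ofList (usd.map (·.1)) := by
  have h := PySem.Dict.keys_foldl_insert_key (ν := List Int) usd (·.1) (fun _ p => p.2) PySem.Dict.empty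
  have ho : PySem.Dict.ofList usd = List.foldl (fun d p => d.insert p.1 p.2) PySem.Dict.empty usd := by
    simp [PySem.Dict.ofList, PySem.Dict.update]
  rw [ho]
  simpa [PySem.Set.ofList_eq_foldl, PySem.Set.update] using h

-- the heart: for every key u, A's symmetric-difference distance equals B's
-- |active| + sizes[u] - 2*counts[u]
theorem pvDist_eq (ua : List Int) (usd : List (Int × List Int)) (u : Int)
    (hu : u ∈ (PySem.Dict.ofList usd).keys) :
    PySem.Set.len (PySem.Set.symmDiff (PySem.Set.ofList ua)
        (PySem.Set.ofList ((PySem.Dict.ofList usd).getD u []))) =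
      PySem.Set.len (PySem.Set.ofList ua)
        + (pvSizes usd).getD u 0 - 2 * (pvCounts ua usd).getD u 0 := by
  have hk : (PySem.Dict.ofList usd).keys.Nodup := PySem.Dict.nodup_keys_ofList usd
  obtain ⟨lst, hget⟩ : ∃ lst, (PySem.Dict.ofList usd).get? u = some lst := by
    cases hq : (PySem.Dict.ofList usd).get? u with
    | none => exact absurd hu ((PySem.Dict.get?_eq_none_iff_not_mem_keys _ u).mp hq)
    | some lst => exact ⟨lst, rfl⟩
  have hgd : (PySem.Dict.ofList usd).getD u [] = lst :=
    PySem.Dict.getD_of_get?_eq_some _ _ hget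
  have hit : (u, lst) ∈ (PySem.Dict.ofList usd).items :=
    PySem.Dict.mem_items_of_get?_eq_some _ hget
  have hknd : ((PySem.Dict.ofList usd).items.map (·.1)).Nodup := by
    simpa [PySem.Dict.keys] using hk
  -- sizes[u] = len(set(lst))
  have hsz_items : (pvSizes usd).items =
      (PySem.Dict.ofList usd).items.map (fun p => (p.1, PySem.Set.len (PySem.Set.ofList p.2))) := by
    have := PySem.Dict.items_foldl_insert_fresh (PySem.Dict.ofList usd).items (·.1)
      (fun p => PySem.Set.len (PySem.Set.ofList p.2)) PySem.Dict.empty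
      (fun a _ => by simp) hknd
    simpa [pvSizes] using this
  have hsz_nd : (pvSizes usd).keys.Nodup := by
    have := PySem.Dict.nodup_keys_foldl_insert_key (PySem.Dict.ofList usd).items (·.1)
      (fun _ p => PySem.Set.len (PySem.Set.ofList p.2)) PySem.Dict.empty (by simp)
    simpa [pvSizes] using this
  have hsz : (pvSizes usd).getD u 0 = PySem.Set.len (PySem.Set.ofList lst) := by
    refine PySem.Dict.getD_of_mem_items _ ?_ hsz_nd 0
    rw [hsz_items]
    exact List.mem_map_of_mem hit
  -- pairs as a flatMap
  have hpairs : pvPairs usd =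
      (PySem.Dict.ofList usd).items.flatMap (fun p => (PySem.Set.ofList p.2).map (fun a => (a, p.1))) := by
    simpa [pvPairs] using PySem.List.foldl_append_eq_flatMap
      (fun p : Int × List Int => (PySem.Set.ofList p.2).map (fun a => (a, p.1)))
      (PySem.Dict.ofList usd).items []
  -- inverted[a] = the users whose set contains a
  have hinv : ∀ a : Int, (pvInverted usd).getD a [] =
      ((pvPairs usd).filter (fun q => q.1 == a)).map (·.2) := by
    intro a
    simpa [pvInverted] using PySem.Dict.getD_foldl_modify_append (pvPairs usd) PySem.Dict.empty a
  -- count of u in inverted[a] is 1 iff a is in u's set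
  have hcnt_a : ∀ a : Int, List.count u ((pvInverted usd).getD a []) =
      (if a ∈ PySem.Set.ofList lst then 1 else 0) := by
    intro a
    rw [hinv a]
    have e1 : List.count u (((pvPairs usd).filter (fun q => q.1 == a)).map (·.2)) =
        List.count (a, u) (pvPairs usd) := by
      simp only [List.count_eq_countP, List.countP_map, List.countP_filter]
      apply List.countP_congr
      intro q _
      obtain ⟨q1, q2⟩ := q
      simp [pvProdBeq, and_comm]
    rw [e1, hpairs, List.count_flatMap]
    have e2 : (PySem.Dict.ofList usd).items.map
        (List.count (a, u) ∘ fun p => (PySem.Set.ofList p.2).map (fun x => (x, p.1))) =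
        (PySem.Dict.ofList usd).items.map
        (fun p => if p.1 = u then (if a ∈ PySem.Set.ofList p.2 then 1 else 0) else 0) := by
      apply List.map_congr_left
      intro p _
      have hmemcnt : List.count a (PySem.Set.ofList p.2) =
          if a ∈ PySem.Set.ofList p.2 then 1 else 0 := by
        by_cases hm : a ∈ PySem.Set.ofList p.2
        · simp [hm]
        · simp [hm, List.count_eq_zero_of_not_mem hm]
      have hmap : List.count (a, u) ((PySem.Set.ofList p.2).map (fun x => (x, p.1))) =
          if p.1 = u then List.count a (PySem.Set.ofList p.2) else 0 := by
        by_cases h : p.1 = u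
        · rw [h]
          simp [List.count_eq_countP, List.countP_map, pvProdBeq, Function.comp_def]
        · simp [List.count_eq_countP, List.countP_map, pvProdBeq, Function.comp_def, h]
      simp only [Function.comp_apply]
      rw [hmap]
      by_cases h : p.1 = u <;> simp [h, hmemcnt]
    rw [e2, pvSum_single_key _ u lst (fun v => if a ∈ PySem.Set.ofList v then 1 else 0) hknd hit]
  -- counts[u] = |active ∩ set(lst)|
  have hcounts : (pvCounts ua usd).getD u 0 =
      ((PySem.Set.ofList ua).countP (fun x => decide (x ∈ PySem.Set.ofList lst)) : Int) := by
    have h0 : pvCounts ua usd = List.foldl (fun c u => c.modify u 0 (· + 1)) PySem.Dict.empty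
        ((PySem.Set.ofList ua).flatMap (fun a => (pvInverted usd).getD a [])) := by
      simp [pvCounts, List.foldl_flatMap]
    rw [h0, PySem.Dict.getD_foldl_modify_add_one, PySem.Dict.getD_empty, List.count_flatMap]
    have e3 : (PySem.Set.ofList ua).map (List.count u ∘ fun a => (pvInverted usd).getD a []) =
        (PySem.Set.ofList ua).map (fun a => if a ∈ PySem.Set.ofList lst then (1 : Nat) else 0) := by
      apply List.map_congr_left
      intro a _
      simpa [Function.comp_def] using hcnt_a a
    rw [e3, pvSum_ite_countP]
    simp
  -- assemble
  rw [hgd, hsz, hcounts,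
    pvSymmDiff_len (PySem.Set.ofList ua) (PySem.Set.ofList lst)
      (PySem.Set.nodup_ofList ua) (PySem.Set.nodup_ofList lst)]
  rfl

theorem pvConv_eq (x : Int × Option Int) : pvConv x = x.2.map (fun c => (x.1, c)) := by
  obtain ⟨u, c⟩ := x
  cases c <;> rfl

-- ===== VERDICT (by name: the statement is the Claim_ definition above) =====
theorem find_closest_user_spec : Claim_equal_find_closest_user := by
  intro ua usd _ hpre
  unfold Spec_find_closest_user
  simp only [find_closest_user, find_closest_user_alt]
  set fA : Int → Int := fun user =>
    PySem.Set.len (PySem.Set.symmDiff (PySem.Set.ofList ua)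
      (PySem.Set.ofList ((PySem.Dict.ofList usd).getD user []))) with hfA
  set fB : Int → Int := fun user =>
    PySem.Set.len (PySem.Set.ofList ua)
      + (pvSizes usd).getD user 0 - 2 * (pvCounts ua usd).getD user 0 with hfB
  have hdist : ∀ u ∈ (PySem.Dict.ofList usd).keys, fA u = fB u := by
    intro u hu
    simpa [hfA, hfB] using pvDist_eq ua usd u hu
  have hne : (PySem.Dict.ofList usd).keys ≠ [] := by
    cases usd with
    | nil => exact absurd rfl hpre
    | cons p ps =>
      rw [pvKeys_ofList]
      have : p.1 ∈ PySem.Set.ofList (((p :: ps).map (·.1))) :=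
        (PySem.Set.mem_ofList _ _).mpr (by simp)
      exact List.ne_nil_of_mem this
  have hconv := pvFold_conv fA fB (PySem.Dict.ofList usd).keys hdist (0, none)
  have hsome := pvFold_isSome fA (PySem.Dict.ofList usd).keys (0, none) (Or.inl hne)
  rw [show (none : Option (Int × Int)) = pvConv (0, none) from rfl, hconv]
  set r := List.foldl (pvStepA fA) (0, none) (PySem.Dict.ofList usd).keys with hr
  rw [pvConv_eq]
  cases hrc : r.2 with
  | none => rw [hrc] at hsome; simp at hsome
  | some c => rfl
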